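-- pv_equiv track=rewrite | github.com/WTCSC/fahrenheit-404-LeGarbage | fahrenheit.py | parse_temperature_value
-- ===== SOURCE A (Python) =====
-- def parse_temperature_value(temperature):
--     temperature_value = ""
--     for char in temperature:
--         if char in "1234567890":
--             temperature_value += char
--         elif char == "." and "." not in temperature_value:
--             temperature_value += char
--
--     if temperature_value == ".":
--         temperature_value = ""
--
--     return temperature_value
-- ===== SOURCE B (Python) =====
-- def parse_temperature_value(temperature):
--     filtered = ''.join(c for c in temperature if c in '0123456789.')
--     head, sep, tail = filtered.partition('.')
--     result = head + '.' + tail.replace('.', '') if sep else head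
--     if result == '.':
--         result = ''
--     return result
-- ===== Notes on version B (the rewrite author's own statement) =====
-- stated objective: alternative
-- what changed: Replaced the accumulate-with-membership-check loop (which tests '.' against the growing result each step) by a filter pass followed by partition at the first dot and stripping dots from the tail.
import Mathlib
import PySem

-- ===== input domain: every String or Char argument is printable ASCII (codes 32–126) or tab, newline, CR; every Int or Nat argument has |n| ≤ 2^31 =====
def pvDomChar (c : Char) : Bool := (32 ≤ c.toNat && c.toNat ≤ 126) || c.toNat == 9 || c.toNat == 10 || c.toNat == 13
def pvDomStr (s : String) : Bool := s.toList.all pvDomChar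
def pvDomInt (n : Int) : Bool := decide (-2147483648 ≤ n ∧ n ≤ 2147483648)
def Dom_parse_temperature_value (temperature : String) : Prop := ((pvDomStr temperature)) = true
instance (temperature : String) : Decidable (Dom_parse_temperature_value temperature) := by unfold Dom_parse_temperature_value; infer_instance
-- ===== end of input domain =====

-- B replaces A's accumulate-with-membership-check loop by a filter pass plus partition-at-first-dot with dots stripped from the tail (alternative decomposition).


-- ===== PORT A =====
-- "1234567890" as a char list (A's membership test)
def pvDigitsA : List Char := ['1','2','3','4','5','6','7','8','9','0']

-- one iteration of A's loop: append digits; append '.' only if no '.' accumulated yet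
def pvStepA (acc : List Char) (c : Char) : List Char :=
  if c ∈ pvDigitsA then acc ++ [c]
  else if c = '.' ∧ '.' ∉ acc then acc ++ [c]
  else acc

def parse_temperature_value (temperature : String) : String :=
  let v := temperature.toList.foldl pvStepA []
  if v = ['.'] then "" else String.ofList v

-- ===== PORT B =====
-- membership in "0123456789." (B's filter)
def pvKeepB (c : Char) : Bool := decide (c ∈ (['0','1','2','3','4','5','6','7','8','9','.'] : List Char))

def parse_temperature_value_alt (temperature : String) : String :=
  let f := temperature.toList.filter pvKeepB
  -- partition('.'): head = before first '.', rest = from the first '.' on (empty if no '.')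
  let head := f.takeWhile (fun c => c ≠ '.')
  let rest := f.dropWhile (fun c => c ≠ '.')
  let r := match rest with
    | [] => head                                        -- no dot: just the digits
    | _ :: tail => head ++ '.' :: tail.filter (fun c => c ≠ '.')  -- keep first dot, strip dots from tail
  if r = ['.'] then "" else String.ofList r

-- ===== PRECONDITION & SPEC =====
def Spec_parse_temperature_value (temperature : String) (out : String) : Prop := out = parse_temperature_value_alt temperature
instance (temperature : String) (out : String) : Decidable (Spec_parse_temperature_value temperature out) := by unfold Spec_parse_temperature_value; infer_instance

-- ===== CLAIM (what is proved, stated in full; the proofs are below) =====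
def Claim_equal_parse_temperature_value : Prop := ∀ (temperature : String), Dom_parse_temperature_value temperature → Spec_parse_temperature_value temperature (parse_temperature_value temperature)

-- ===== LEMMAS AND PROOFS =====

-- B's core on a char list
def pvCoreB (l : List Char) : List Char :=
  let f := l.filter pvKeepB
  match f.dropWhile (fun c => c ≠ '.') with
  | [] => f.takeWhile (fun c => c ≠ '.')
  | _ :: tail => f.takeWhile (fun c => c ≠ '.') ++ '.' :: tail.filter (fun c => c ≠ '.')

-- once a '.' is in the accumulator, A only appends the remaining digits
theorem pv_foldl_dot (l : List Char) : ∀ acc : List Char, '.' ∈ acc →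
    l.foldl pvStepA acc = acc ++ l.filter (fun c => decide (c ∈ pvDigitsA)) := by
  induction l with
  | nil => intro acc _; simp
  | cons c l ih =>
    intro acc hdot
    by_cases hd : c ∈ pvDigitsA
    · have : pvStepA acc c = acc ++ [c] := by simp [pvStepA, hd]
      simp only [List.foldl_cons, this]
      rw [ih _ (by simp [hdot])]
      simp [hd]
    · have hstep : pvStepA acc c = acc := by
        simp only [pvStepA, if_neg hd]
        rw [if_neg]
        rintro ⟨rfl, hna⟩; exact hna hdot
      rw [List.foldl_cons, hstep, ih _ hdot]
      simp [hd]

-- filtering "digits or dot" then removing dots is filtering digits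
theorem pv_filter_dot (l : List Char) :
    (l.filter pvKeepB).filter (fun c => c ≠ '.') = l.filter (fun c => decide (c ∈ pvDigitsA)) := by
  induction l with
  | nil => simp
  | cons c l ih =>
    by_cases h : c = '.'
    · subst h; simpa [pvKeepB, pvDigitsA] using ih
    · by_cases hd : c ∈ pvDigitsA
      · simp only [pvDigitsA, List.mem_cons, List.not_mem_nil, or_false] at hd
        rcases hd with rfl|rfl|rfl|rfl|rfl|rfl|rfl|rfl|rfl|rfl <;> simpa [pvKeepB, pvDigitsA] using ih
      · have hk : pvKeepB c = false := by
          simp only [pvKeepB, decide_eq_false_iff_not]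
          intro hm
          simp only [List.mem_cons, List.not_mem_nil, or_false] at hm
          rcases hm with rfl|rfl|rfl|rfl|rfl|rfl|rfl|rfl|rfl|rfl|rfl
          all_goals first | exact h rfl | exact hd (by decide)
        simpa [hk, hd] using ih

theorem pv_core_digit (c : Char) (l : List Char) (hd : c ∈ pvDigitsA) :
    pvCoreB (c :: l) = c :: pvCoreB l := by
  have hk : pvKeepB c = true := by
    simp only [pvDigitsA, List.mem_cons, List.not_mem_nil, or_false] at hd
    rcases hd with rfl|rfl|rfl|rfl|rfl|rfl|rfl|rfl|rfl|rfl <;> decide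
  have hne : c ≠ '.' := by
    simp only [pvDigitsA, List.mem_cons, List.not_mem_nil, or_false] at hd
    rcases hd with rfl|rfl|rfl|rfl|rfl|rfl|rfl|rfl|rfl|rfl <;> decide
  simp only [pvCoreB, List.filter_cons, hk, if_pos rfl, List.takeWhile_cons,
    List.dropWhile_cons, hne, decide_eq_true_eq, if_true, decide_not]
  cases h : (l.filter pvKeepB).dropWhile (fun c => !decide (c = '.')) with
  | nil => simp [hne]
  | cons x t => simp [hne]

theorem pv_core_skip (c : Char) (l : List Char) (hk : pvKeepB c = false) :
    pvCoreB (c :: l) = pvCoreB l := by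
  simp [pvCoreB, List.filter_cons, hk]

theorem pv_core_dot (l : List Char) :
    pvCoreB ('.' :: l) = '.' :: l.filter (fun c => decide (c ∈ pvDigitsA)) := by
  simp only [pvCoreB, List.filter_cons, show pvKeepB '.' = true from rfl, if_pos rfl,
    List.takeWhile_cons, List.dropWhile_cons]
  simpa using pv_filter_dot l

-- A's fold from a dot-free accumulator computes acc ++ pvCoreB of the rest
theorem pv_foldl_nodot (l : List Char) : ∀ acc : List Char, '.' ∉ acc →
    l.foldl pvStepA acc = acc ++ pvCoreB l := by
  induction l with
  | nil => intro acc _; simp [pvCoreB]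
  | cons c l ih =>
    intro acc hdot
    by_cases hd : c ∈ pvDigitsA
    · have hne : c ≠ '.' := by
        simp only [pvDigitsA, List.mem_cons, List.not_mem_nil, or_false] at hd
        rcases hd with rfl|rfl|rfl|rfl|rfl|rfl|rfl|rfl|rfl|rfl <;> decide
      have hstep : pvStepA acc c = acc ++ [c] := by simp [pvStepA, hd]
      rw [List.foldl_cons, hstep, ih _ (by simp [hdot, Ne.symm hne]), pv_core_digit c l hd]
      simp
    · by_cases hc : c = '.'
      · subst hc
        have hstep : pvStepA acc '.' = acc ++ ['.'] := by
          simp [pvStepA, hd, hdot]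
        rw [List.foldl_cons, hstep, pv_foldl_dot l _ (by simp), pv_core_dot]
        simp
      · have hstep : pvStepA acc c = acc := by
          simp only [pvStepA, if_neg hd]
          rw [if_neg]; rintro ⟨rfl, _⟩; exact hc rfl
        have hk : pvKeepB c = false := by
          simp only [pvKeepB, decide_eq_false_iff_not]
          intro hm
          simp only [List.mem_cons, List.not_mem_nil, or_false] at hm
          rcases hm with rfl|rfl|rfl|rfl|rfl|rfl|rfl|rfl|rfl|rfl|rfl
          all_goals first | exact hc rfl | exact hd (by decide)
        rw [List.foldl_cons, hstep, ih _ hdot, pv_core_skip c l hk]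

-- ===== VERDICT (by name: the statement is the Claim_ definition above) =====
theorem parse_temperature_value_spec : Claim_equal_parse_temperature_value := by
  intro t _
  unfold Spec_parse_temperature_value parse_temperature_value parse_temperature_value_alt
  rw [pv_foldl_nodot t.toList [] (by simp)]
  simp only [List.nil_append]
  rfl
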